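-- pv_equiv track=rewrite | github.com/oanatn/SAT_algorithms | dpll.py | monotone_literal_fixing
-- ===== SOURCE A (Python) =====
-- def monotone_literal_fixing(formula):
--     """Fix monotone literals and apply their assignments to simplify the formula."""
--     assignment = {}
--     for clause in formula:
--         for literal in clause:
--             if -literal not in [lit for subclause in formula for lit in subclause]:
--                 assignment[literal] = True
--                 formula = [c for c in formula if literal not in c]  # Remove satisfied clauses
--                 break
--     return formula, assignment
-- ===== SOURCE B (Python) =====
-- def monotone_literal_fixing(formula):
--     """Fix monotone literals and apply their assignments to simplify the formula.
--
--     Same result as the naive version, but a per-literal occurrence counter of the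
--     current formula makes the monotone test O(1); counts are decremented when a
--     satisfied clause is removed.
--     """
--     count = {}
--     for clause in formula:
--         for lit in clause:
--             count[lit] = count.get(lit, 0) + 1
--     assignment = {}
--     current = formula
--     for clause in formula:
--         for literal in clause:
--             if count.get(-literal, 0) == 0:
--                 assignment[literal] = True
--                 kept = []
--                 for c in current:
--                     if literal in c:
--                         for lit in c:
--                             count[lit] -= 1
--                     else:
--                         kept.append(c)
--                 current = kept
--                 break
--     return current, assignment
-- ===== Notes on version B (the rewrite author's own statement) =====
-- stated objective: faster
-- what changed: B precomputes a per-literal occurrence counter of the current formula and keeps it up to date (decrementing when a satisfied clause is removed), so the monotone test is an O(1) dict lookup instead of A's rebuild-and-scan of the whole flattened formula for every literal.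
import Mathlib
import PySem

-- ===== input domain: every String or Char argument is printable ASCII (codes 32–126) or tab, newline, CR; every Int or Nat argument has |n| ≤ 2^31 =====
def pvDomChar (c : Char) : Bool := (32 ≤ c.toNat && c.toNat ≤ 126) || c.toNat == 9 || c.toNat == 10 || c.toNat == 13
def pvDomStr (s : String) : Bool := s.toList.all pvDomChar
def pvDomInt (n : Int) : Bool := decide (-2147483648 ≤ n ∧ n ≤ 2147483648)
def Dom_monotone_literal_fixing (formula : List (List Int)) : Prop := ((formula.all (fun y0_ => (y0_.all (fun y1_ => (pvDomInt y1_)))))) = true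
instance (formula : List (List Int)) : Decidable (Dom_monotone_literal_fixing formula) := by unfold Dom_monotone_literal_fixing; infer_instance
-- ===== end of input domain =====

-- B replaces A's full-formula membership scan per literal by a maintained per-literal
-- occurrence counter (O(1) monotone test; counts decremented when satisfied clauses are removed).

-- ===== PORT A =====
-- inner 'for literal in clause: …' loop with its break
def pvInnerA (cur : List (List Int)) (asn : PySem.Dict Int Bool) :
    List Int → List (List Int) × PySem.Dict Int Bool
  | [] => (cur, asn)
  | lit :: rest =>
    if !((cur.flatMap id).contains (-lit)) then
      ((cur.filter (fun c => !(c.contains lit))), asn.insert lit true)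
    else pvInnerA cur asn rest

def monotone_literal_fixing (formula : List (List Int)) :
    List (List Int) × (List (Int × Bool)) :=
  let st := formula.foldl (fun st clause => pvInnerA st.1 st.2 clause)
    (formula, PySem.Dict.empty)
  (st.1, st.2.items)

-- ===== PORT B =====
-- one removal pass: keep clauses without the literal, decrement counts of removed clauses
def pvRemoveB (lit : Int) (cur : List (List Int)) (count : PySem.Dict Int Int) :
    List (List Int) × PySem.Dict Int Int :=
  cur.foldl (fun (st : List (List Int) × PySem.Dict Int Int) c =>
    if c.contains lit then
      (st.1, c.foldl (fun d l => d.insert l (d.getD l 0 - 1)) st.2)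
    else (st.1 ++ [c], st.2)) ([], count)

-- inner 'for literal in clause: …' loop with its break
def pvInnerB (cur : List (List Int)) (count : PySem.Dict Int Int)
    (asn : PySem.Dict Int Bool) :
    List Int → List (List Int) × PySem.Dict Int Int × PySem.Dict Int Bool
  | [] => (cur, count, asn)
  | lit :: rest =>
    if count.getD (-lit) 0 == 0 then
      let st := pvRemoveB lit cur count
      (st.1, st.2, asn.insert lit true)
    else pvInnerB cur count asn rest

def monotone_literal_fixing_alt (formula : List (List Int)) :
    List (List Int) × (List (Int × Bool)) :=
  let count := formula.foldl (fun d clause =>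
    clause.foldl (fun d lit => d.insert lit (d.getD lit 0 + 1)) d) PySem.Dict.empty
  let st := formula.foldl
    (fun (st : List (List Int) × PySem.Dict Int Int × PySem.Dict Int Bool) clause =>
      pvInnerB st.1 st.2.1 st.2.2 clause)
    (formula, count, PySem.Dict.empty)
  (st.1, st.2.2.items)

-- ===== PRECONDITION & SPEC =====
def Spec_monotone_literal_fixing (formula : List (List Int)) (out : List (List Int) × (List (Int × Bool))) : Prop := out = monotone_literal_fixing_alt formula
instance (formula : List (List Int)) (out : List (List Int) × (List (Int × Bool))) : Decidable (Spec_monotone_literal_fixing formula out) := by unfold Spec_monotone_literal_fixing; infer_instance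

-- ===== CLAIM (what is proved, stated in full; the proofs are below) =====
def Claim_equal_monotone_literal_fixing : Prop := ∀ (formula : List (List Int)), Dom_monotone_literal_fixing formula → Spec_monotone_literal_fixing formula (monotone_literal_fixing formula)

-- ===== LEMMAS AND PROOFS =====

def pvCountInv (cur : List (List Int)) (d : PySem.Dict Int Int) : Prop :=
  ∀ l : Int, d.getD l 0 = ((cur.flatMap id).count l : Int)

lemma pvDec_getD (c : List Int) (d : PySem.Dict Int Int) (l : Int) :
    (c.foldl (fun d x => d.insert x (d.getD x 0 - 1)) d).getD l 0
      = d.getD l 0 - (c.count l : Int) := by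
  induction c generalizing d with
  | nil => simp
  | cons x rest ih =>
    simp only [List.foldl_cons, ih, List.count_cons]
    rw [PySem.Dict.getD_insert]
    by_cases h : l = x
    · simp [h]; ring
    · simp [h, Ne.symm h]

lemma pvRemoveB_fold (lit : Int) (cur : List (List Int)) :
    ∀ (kept : List (List Int)) (d : PySem.Dict Int Int),
    (cur.foldl (fun (st : List (List Int) × PySem.Dict Int Int) c =>
      if c.contains lit then
        (st.1, c.foldl (fun d l => d.insert l (d.getD l 0 - 1)) st.2)
      else (st.1 ++ [c], st.2)) (kept, d)).1
        = kept ++ cur.filter (fun c => !(c.contains lit)) ∧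
    ∀ l, (cur.foldl (fun (st : List (List Int) × PySem.Dict Int Int) c =>
      if c.contains lit then
        (st.1, c.foldl (fun d l => d.insert l (d.getD l 0 - 1)) st.2)
      else (st.1 ++ [c], st.2)) (kept, d)).2.getD l 0
        = d.getD l 0
          - (((cur.filter (fun c => c.contains lit)).flatMap id).count l : Int) := by
  induction cur with
  | nil => intro kept d; simp
  | cons c cs ih =>
    intro kept d
    by_cases hc : c.contains lit
    · have h := ih kept (c.foldl (fun d l => d.insert l (d.getD l 0 - 1)) d)
      simp only [List.foldl_cons, hc, if_pos, List.filter_cons]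
      constructor
      · simpa using h.1
      · intro l
        have := h.2 l
        rw [this, pvDec_getD]
        simp [List.count_append]
        ring
    · have h := ih (kept ++ [c]) d
      simp only [List.foldl_cons, hc, List.filter_cons]
      constructor
      · simpa [List.append_assoc] using h.1
      · intro l
        have := h.2 l
        simpa [hc] using this

lemma pvRemoveB_spec (lit : Int) (cur : List (List Int)) (d : PySem.Dict Int Int)
    (hinv : pvCountInv cur d) :
    (pvRemoveB lit cur d).1 = cur.filter (fun c => !(c.contains lit)) ∧
    pvCountInv (cur.filter (fun c => !(c.contains lit))) (pvRemoveB lit cur d).2 := by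
  have h := pvRemoveB_fold lit cur [] d
  refine ⟨by simpa [pvRemoveB] using h.1, ?_⟩
  intro l
  have hperm : (cur.filter (fun c => c.contains lit)
      ++ cur.filter (fun c => !(c.contains lit))).Perm cur :=
    List.filter_append_perm _ cur
  have hflat := (hperm.flatMap_right id).count_eq l
  rw [List.flatMap_append, List.count_append] at hflat
  have := h.2 l
  simp only [pvRemoveB]
  rw [this, hinv l, ← hflat]
  push_cast; ring

lemma pvInner_eq (lits : List Int) (cur : List (List Int))
    (d : PySem.Dict Int Int) (asn : PySem.Dict Int Bool)
    (hinv : pvCountInv cur d) :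
    (pvInnerB cur d asn lits).1 = (pvInnerA cur asn lits).1 ∧
    (pvInnerB cur d asn lits).2.2 = (pvInnerA cur asn lits).2 ∧
    pvCountInv (pvInnerB cur d asn lits).1 (pvInnerB cur d asn lits).2.1 := by
  induction lits with
  | nil => exact ⟨rfl, rfl, hinv⟩
  | cons lit rest ih =>
    by_cases hc : ((cur.flatMap id).contains (-lit)) = true
    · have hm : (-lit) ∈ cur.flatMap id := by simpa using hc
      have hn : (cur.flatMap id).count (-lit) ≠ 0 := by
        simpa [List.count_eq_zero] using hm
      have hn' : ((cur.flatMap id).count (-lit) : Int) ≠ 0 := by exact_mod_cast hn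
      have hB : (d.getD (-lit) 0 == 0) = false := by
        rw [hinv (-lit)]
        simpa using hn'
      simpa only [pvInnerA, pvInnerB, hc, hB, Bool.not_true, Bool.false_eq_true,
        if_false] using ih
    · have hcf : ((cur.flatMap id).contains (-lit)) = false := by simpa using hc
      have hm : (-lit) ∉ cur.flatMap id := by simpa using hcf
      have hB : (d.getD (-lit) 0 == 0) = true := by
        rw [hinv (-lit), List.count_eq_zero.mpr hm]
        rfl
      have hr := pvRemoveB_spec lit cur d hinv
      simp only [pvInnerA, pvInnerB, hcf, hB, Bool.not_false, if_true]
      exact ⟨by simpa using hr.1, by simp, by simpa [hr.1] using hr.2⟩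

lemma pvCount_foldl (fs : List (List Int)) :
    ∀ (d : PySem.Dict Int Int) (l : Int),
    (fs.foldl (fun d clause =>
      clause.foldl (fun d lit => d.insert lit (d.getD lit 0 + 1)) d) d).getD l 0
      = d.getD l 0 + ((fs.flatMap id).count l : Int) := by
  induction fs with
  | nil => intro d l; simp
  | cons c cs ih =>
    intro d l
    rw [List.foldl_cons, ih, PySem.Dict.getD_foldl_insert_add_one]
    simp [List.count_append]
    ring

lemma pvOuter_eq (cs : List (List Int)) :
    ∀ (cur : List (List Int)) (d : PySem.Dict Int Int) (asn : PySem.Dict Int Bool),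
    pvCountInv cur d →
    (cs.foldl (fun (st : List (List Int) × PySem.Dict Int Int × PySem.Dict Int Bool)
        clause => pvInnerB st.1 st.2.1 st.2.2 clause) (cur, d, asn)).1
      = (cs.foldl (fun (st : List (List Int) × PySem.Dict Int Bool) clause =>
          pvInnerA st.1 st.2 clause) (cur, asn)).1 ∧
    (cs.foldl (fun (st : List (List Int) × PySem.Dict Int Int × PySem.Dict Int Bool)
        clause => pvInnerB st.1 st.2.1 st.2.2 clause) (cur, d, asn)).2.2
      = (cs.foldl (fun (st : List (List Int) × PySem.Dict Int Bool) clause =>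
          pvInnerA st.1 st.2 clause) (cur, asn)).2 := by
  induction cs with
  | nil => intro cur d asn h; exact ⟨rfl, rfl⟩
  | cons c rest ih =>
    intro cur d asn h
    obtain ⟨h1, h2, h3⟩ := pvInner_eq c cur d asn h
    have hrec := ih (pvInnerB cur d asn c).1 (pvInnerB cur d asn c).2.1
      (pvInnerB cur d asn c).2.2 h3
    have hst : pvInnerA cur asn c
        = ((pvInnerB cur d asn c).1, (pvInnerB cur d asn c).2.2) := by
      rw [h1, h2]
    simp only [List.foldl_cons]
    rw [hst]
    simpa only [Prod.mk.eta] using hrec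

-- ===== VERDICT (by name: the statement is the Claim_ definition above) =====
theorem monotone_literal_fixing_spec : Claim_equal_monotone_literal_fixing := by
  intro formula _hdom
  unfold Spec_monotone_literal_fixing monotone_literal_fixing monotone_literal_fixing_alt
  have hinv : pvCountInv formula (formula.foldl (fun d clause =>
      clause.foldl (fun d lit => d.insert lit (d.getD lit 0 + 1)) d)
      PySem.Dict.empty) := by
    intro l; rw [pvCount_foldl]; simp
  obtain ⟨h1, h2⟩ := pvOuter_eq formula formula _ PySem.Dict.empty hinv
  simp only
  rw [h1, h2]
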